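-- pv_equiv track=rewrite | github.com/sneddy/Two-financial-instruments | calc.py | is_dif_changed_to_neg
-- ===== SOURCE A (Python) =====
-- def is_dif_changed_to_neg(dif):
--     last_dif = dif[-1]
--     ret = False
--     if last_dif < 0:
--         for d in reversed(dif[:len(dif) - 1]):
--             if d == 0:
--                 continue
--             elif d > 0:
--                 return True
--             else:
--                 return False
--     return ret
-- ===== SOURCE B (Python) =====
-- def is_dif_changed_to_neg(dif):
--     last = dif[-1]
--     last_sign = 0
--     for d in dif[:-1]:
--         if d != 0:
--             last_sign = 1 if d > 0 else -1
--     return last < 0 and last_sign > 0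
-- ===== Notes on version B (the rewrite author's own statement) =====
-- stated objective: alternative
-- what changed: Replaces A's backward early-exit scan over the reversed prefix with a single forward pass that maintains a last_sign accumulator and decides by one boolean formula at the end.
import Mathlib
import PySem

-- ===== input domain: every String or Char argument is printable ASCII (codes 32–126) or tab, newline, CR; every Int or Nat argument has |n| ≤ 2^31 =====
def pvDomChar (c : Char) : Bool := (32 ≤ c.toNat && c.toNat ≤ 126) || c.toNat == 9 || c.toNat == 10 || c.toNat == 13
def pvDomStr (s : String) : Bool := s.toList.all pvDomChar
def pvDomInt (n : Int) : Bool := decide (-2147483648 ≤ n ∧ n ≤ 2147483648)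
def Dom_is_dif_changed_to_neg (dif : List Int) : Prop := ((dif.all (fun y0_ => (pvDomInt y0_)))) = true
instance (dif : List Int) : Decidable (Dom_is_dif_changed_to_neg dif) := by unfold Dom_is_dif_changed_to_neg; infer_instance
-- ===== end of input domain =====

-- B replaces A's backward early-exit over the reversed prefix by a forward accumulator
-- pass (last_sign) with a final boolean formula; equal cost, different decomposition.


-- ===== PORT A =====
-- A's backward loop with early returns: first nonzero d decides (True if d > 0, False if d < 0).
def pvAScan : List Int → Bool
  | [] => false
  | d :: rest => if d = 0 then pvAScan rest else if d > 0 then true else false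

def is_dif_changed_to_neg (dif : List Int) : Bool :=
  match PySem.List.pyGet? dif (-1) with
  | none => false  -- Python raises IndexError here; excluded by Pre_
  | some last_dif =>
    if last_dif < 0 then
      pvAScan (PySem.List.slice dif none (some ((dif.length : Int) - 1))).reverse
    else false

-- ===== PORT B =====
def pvBStep (s d : Int) : Int := if d ≠ 0 then (if d > 0 then 1 else -1) else s

def is_dif_changed_to_neg_alt (dif : List Int) : Bool :=
  match PySem.List.pyGet? dif (-1) with
  | none => false  -- Python raises IndexError here; excluded by Pre_
  | some last =>
    let lastSign := (PySem.List.slice dif none (some (-1))).foldl pvBStep 0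
    decide (last < 0) && decide (lastSign > 0)

-- ===== PRECONDITION & SPEC =====
-- Reading the last element raises IndexError on the empty list in both programs.
def Pre_is_dif_changed_to_neg (dif : List Int) : Prop := dif ≠ []
instance (dif : List Int) : Decidable (Pre_is_dif_changed_to_neg dif) := by unfold Pre_is_dif_changed_to_neg; infer_instance
def pvWitness_is_dif_changed_to_neg : List Int := [1, 0, -2]

def Spec_is_dif_changed_to_neg (dif : List Int) (out : Bool) : Prop := out = is_dif_changed_to_neg_alt dif
instance (dif : List Int) (out : Bool) : Decidable (Spec_is_dif_changed_to_neg dif out) := by unfold Spec_is_dif_changed_to_neg; infer_instance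

-- ===== CLAIM (what is proved, stated in full; the proofs are below) =====
def Claim_equal_is_dif_changed_to_neg : Prop := ∀ (dif : List Int), Dom_is_dif_changed_to_neg dif → Pre_is_dif_changed_to_neg dif → Spec_is_dif_changed_to_neg dif (is_dif_changed_to_neg dif)

-- ===== LEMMAS AND PROOFS =====

-- The backward early-exit scan over l.reverse returns true iff B's forward accumulator ends positive.
theorem pvAScan_reverse_eq (l : List Int) :
    pvAScan l.reverse = decide (l.foldl pvBStep 0 > 0) := by
  induction l using List.reverseRecOn with
  | nil => simp [pvAScan]
  | append_singleton l d ih =>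
    rw [List.reverse_append]
    simp only [List.reverse_cons, List.reverse_nil, List.nil_append, List.singleton_append,
      List.foldl_append, List.foldl_cons, List.foldl_nil]
    by_cases hd : d = 0
    · simp [pvAScan, pvBStep, hd, ih]
    · by_cases hp : d > 0 <;> simp [pvAScan, pvBStep, hd, hp]

theorem pvSlices_eq (dif : List Int) (h : dif ≠ []) :
    PySem.List.slice dif none (some ((dif.length : Int) - 1)) =
      PySem.List.slice dif none (some (-1)) := by
  rw [PySem.List.slice_to_neg_one]
  have hlen : 1 ≤ dif.length := List.length_pos_iff.mpr h
  have : ((dif.length : Int) - 1) = ((dif.length - 1 : Nat) : Int) := by omega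
  rw [this, PySem.List.slice_to_natCast, List.dropLast_eq_take]

-- ===== VERDICT (by name: the statement is the Claim_ definition above) =====
theorem is_dif_changed_to_neg_spec : Claim_equal_is_dif_changed_to_neg := by
  intro dif _ hpre
  unfold Spec_is_dif_changed_to_neg is_dif_changed_to_neg is_dif_changed_to_neg_alt
  cases hg : PySem.List.pyGet? dif (-1) with
  | none => rfl
  | some last =>
    rw [pvSlices_eq dif hpre, pvAScan_reverse_eq]
    by_cases hl : last < 0 <;> simp [hl]
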